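-- pv_equiv track=rewrite | github.com/wzsyf/Python-Code | visual-chameleon/GetMaxCommonSubStrV3.py | calSubStrLen
-- ===== SOURCE A (Python) =====
-- def calSubStrLen(dic):
--
--     subStrKeys = dic.keys()
--     subStrLenDic = {}
--
--     for subStrKey in subStrKeys:
--         subStrKeyLen = len(subStrKey)
--         subStrLenDic[subStrKey] = subStrKeyLen
--
--     dics = sorted(subStrLenDic.items(), key=lambda item: item[1], reverse=True)
--     return dics
-- ===== SOURCE B (Python) =====
-- def calSubStrLen(dic):
--     # Bucket the keys by length, then emit buckets by descending length.
--     buckets = {}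
--     for key in dic:
--         keyLen = len(key)
--         buckets.setdefault(keyLen, []).append(key)
--     out = []
--     for keyLen in sorted(buckets, reverse=True):
--         for key in buckets[keyLen]:
--             out.append((key, keyLen))
--     return out
-- ===== Notes on version B (the rewrite author's own statement) =====
-- stated objective: alternative
-- what changed: Replaces the build-a-length-dict-then-comparison-sort-the-items approach with a bucket sort: keys are grouped into per-length buckets in one pass and the distinct lengths (not the items) are sorted descending, buckets being emitted in order so ties keep dict order.
import Mathlib
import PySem

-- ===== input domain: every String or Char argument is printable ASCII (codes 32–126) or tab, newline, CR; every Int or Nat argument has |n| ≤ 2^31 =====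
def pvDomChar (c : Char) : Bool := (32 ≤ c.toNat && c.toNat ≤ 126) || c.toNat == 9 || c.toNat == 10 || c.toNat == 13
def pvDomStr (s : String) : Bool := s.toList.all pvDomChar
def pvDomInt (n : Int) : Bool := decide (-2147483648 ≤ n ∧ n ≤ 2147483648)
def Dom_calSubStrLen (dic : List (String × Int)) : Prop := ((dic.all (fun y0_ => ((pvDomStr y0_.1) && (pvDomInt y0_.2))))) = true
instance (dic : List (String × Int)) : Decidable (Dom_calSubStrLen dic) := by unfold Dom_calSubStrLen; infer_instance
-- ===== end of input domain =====

-- B replaces A's comparison sort of the items by a bucket sort keyed on the length; equivalence of the two is proved below.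

-- ===== PORT A =====
-- A: build a dict key -> len(key) over the dict's keys, then sort its items by value, descending (stable).
def calSubStrLen (dic : List (String × Int)) : List (String × Int) :=
  let subStrKeys := (PySem.Dict.ofList dic).keys
  let subStrLenDic :=
    subStrKeys.foldl (fun d subStrKey => d.insert subStrKey (PySem.Str.len subStrKey)) PySem.Dict.empty
  PySem.List.sorted subStrLenDic.items (fun item => item.2) true

-- ===== PORT B =====
-- B: group keys into per-length buckets in one pass, sort the distinct lengths descending, emit buckets in order.
def calSubStrLen_alt (dic : List (String × Int)) : List (String × Int) :=
  let buckets :=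
    (PySem.Dict.ofList dic).keys.foldl
      (fun d key => d.modify (PySem.Str.len key) [] (fun v => v ++ [key])) PySem.Dict.empty
  let lens := PySem.List.sorted buckets.keys (fun x => x) true
  lens.foldl (fun out keyLen => out ++ (buckets.getD keyLen []).map (fun key => (key, keyLen))) []

-- ===== PRECONDITION & SPEC =====
def Spec_calSubStrLen (dic : List (String × Int)) (out : List (String × Int)) : Prop := out = calSubStrLen_alt dic
instance (dic : List (String × Int)) (out : List (String × Int)) : Decidable (Spec_calSubStrLen dic out) := by unfold Spec_calSubStrLen; infer_instance

-- ===== CLAIM (what is proved, stated in full; the proofs are below) =====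
def Claim_equal_calSubStrLen : Prop := ∀ (dic : List (String × Int)), Dom_calSubStrLen dic → Spec_calSubStrLen dic (calSubStrLen dic)

-- ===== LEMMAS AND PROOFS =====

-- the comparison insertion sort uses: "a goes before b" iff b's key is smaller (descending, stable)
def pvBefore {α : Type} (x y : α × Int) : Bool := decide (y.2 < x.2)

-- insertBy passes over a prefix it does not go before
theorem pv_insertBy_append {α : Type} (before : α → α → Bool) (x : α) (as bs : List α)
    (h : ∀ a ∈ as, before x a = false) :
    PySem.List.insertBy before x (as ++ bs) = as ++ PySem.List.insertBy before x bs := by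
  induction as with
  | nil => simp
  | cons a as ih =>
    simp only [List.cons_append, PySem.List.insertBy, h a (by simp)]
    simp only [Bool.false_eq_true, if_false, List.cons.injEq, true_and]
    exact ih (fun a ha => h a (by simp [ha]))

-- insertBy puts x in front when it goes before everything
theorem pv_insertBy_front {α : Type} (before : α → α → Bool) (x : α) (ys : List α)
    (h : ∀ y ∈ ys, before x y = true) :
    PySem.List.insertBy before x ys = x :: ys := by
  cases ys with
  | nil => rfl
  | cons y ys => simp [PySem.List.insertBy, h y (by simp)]

-- a bucket of xs ++ [x]
theorem pv_bucket_append {α : Type} (xs : List (α × Int)) (x : α × Int) (L : Int) :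
    (xs ++ [x]).filter (fun p => p.2 == L) =
      xs.filter (fun p => p.2 == L) ++ (if x.2 = L then [x] else []) := by
  rw [List.filter_append, List.filter_singleton]
  by_cases h : x.2 = L
  · simp [h]
  · have hb : (x.2 == L) = false := beq_eq_false_iff_ne.mpr h
    simp [hb, h]

-- buckets over lengths not equal to x.2 are unchanged by appending x
theorem pv_flatMap_unchanged {α : Type} (Ls : List Int) (xs : List (α × Int)) (x : α × Int)
    (h : x.2 ∉ Ls) :
    Ls.flatMap (fun L => (xs ++ [x]).filter (fun p => p.2 == L)) =
      Ls.flatMap (fun L => xs.filter (fun p => p.2 == L)) := by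
  induction Ls with
  | nil => rfl
  | cons L Ls ih =>
    have hL : x.2 ≠ L := fun he => h (by simp [he])
    rw [List.flatMap_cons, List.flatMap_cons, pv_bucket_append, if_neg hL, List.append_nil,
      ih (fun hm => h (List.mem_cons_of_mem _ hm))]

-- every element of the bucket concatenation has its length in Ls
theorem pv_mem_flatMap_snd {α : Type} (Ls : List Int) (xs : List (α × Int)) (y : α × Int)
    (hy : y ∈ Ls.flatMap (fun L => xs.filter (fun p => p.2 == L))) : y.2 ∈ Ls := by
  rcases List.mem_flatMap.mp hy with ⟨L, hL, hyL⟩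
  have := List.of_mem_filter hyL
  simp only [beq_iff_eq] at this
  exact this ▸ hL

-- inserting an element whose length is already a bucket appends it to its own bucket
theorem pv_insert_old {α : Type} (Ls : List Int) (hp : Ls.Pairwise (· > ·))
    (xs : List (α × Int)) (x : α × Int) (hmem : x.2 ∈ Ls) :
    PySem.List.insertBy pvBefore x (Ls.flatMap (fun L => xs.filter (fun p => p.2 == L))) =
      Ls.flatMap (fun L => (xs ++ [x]).filter (fun p => p.2 == L)) := by
  induction Ls with
  | nil => cases hmem
  | cons L Ls ih =>
    have hgt : ∀ l ∈ Ls, L > l := (List.pairwise_cons.mp hp).1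
    simp only [List.flatMap_cons]
    by_cases hx : x.2 = L
    · have hnot : x.2 ∉ Ls := fun h => absurd (hx ▸ hgt _ h) (lt_irrefl _)
      rw [pv_insertBy_append pvBefore x _ _ (fun a ha => by
        have := List.of_mem_filter ha; simp only [beq_iff_eq] at this
        simp [pvBefore, this, hx])]
      rw [pv_insertBy_front pvBefore x _ (fun y hy => by
        have h2 := pv_mem_flatMap_snd Ls xs y hy
        simp [pvBefore, hx ▸ hgt _ h2])]
      rw [pv_bucket_append, if_pos hx, pv_flatMap_unchanged Ls xs x hnot]
      simp
    · have hmem' : x.2 ∈ Ls := by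
        rcases List.mem_cons.mp hmem with he | h
        · exact absurd he hx
        · exact h
      have hlt : x.2 < L := hgt _ hmem'
      rw [pv_insertBy_append pvBefore x _ _ (fun a ha => by
        have := List.of_mem_filter ha; simp only [beq_iff_eq] at this
        simp only [pvBefore, this, decide_eq_false_iff_not]; omega)]
      rw [ih (List.Pairwise.of_cons hp) hmem', pv_bucket_append, if_neg hx]
      simp

-- inserting an element with a fresh length creates a new singleton bucket at its sorted place
theorem pv_insert_new {α : Type} (Ls : List Int) (hp : Ls.Pairwise (· > ·))
    (xs : List (α × Int)) (x : α × Int) (hmem : x.2 ∉ Ls)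
    (hx : xs.filter (fun p => p.2 == x.2) = []) :
    PySem.List.insertBy pvBefore x (Ls.flatMap (fun L => xs.filter (fun p => p.2 == L))) =
      (PySem.List.insertBy (fun a b => decide (b < a)) x.2 Ls).flatMap
        (fun L => (xs ++ [x]).filter (fun p => p.2 == L)) := by
  induction Ls with
  | nil =>
    simp [PySem.List.insertBy, hx]
  | cons L Ls ih =>
    have hgt : ∀ l ∈ Ls, L > l := (List.pairwise_cons.mp hp).1
    have hxL : x.2 ≠ L := fun h => hmem (by simp [h])
    by_cases hcmp : L < x.2
    · rw [pv_insertBy_front pvBefore x _ (fun y hy => by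
        have h2 := pv_mem_flatMap_snd (L :: Ls) xs y hy
        have : y.2 ≤ L := by
          rcases List.mem_cons.mp h2 with he | h
          · exact le_of_eq he
          · exact le_of_lt (hgt _ h)
        simp only [pvBefore, decide_eq_true_eq]; omega)]
      have : PySem.List.insertBy (fun a b => decide (b < a)) x.2 (L :: Ls) = x.2 :: L :: Ls := by
        simp [PySem.List.insertBy, hcmp]
      rw [this]
      simp only [List.flatMap_cons]
      rw [pv_bucket_append, if_pos rfl, hx,
        pv_flatMap_unchanged Ls xs x (fun h => hmem (by simp [h]))]
      have : (xs ++ [x]).filter (fun p => p.2 == L) = xs.filter (fun p => p.2 == L) := by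
        rw [pv_bucket_append, if_neg hxL]; simp
      rw [this]; simp
    · have hlt : x.2 < L := by
        rcases lt_or_gt_of_ne hxL with h | h
        · exact h
        · exact absurd h hcmp
      simp only [List.flatMap_cons]
      rw [pv_insertBy_append pvBefore x _ _ (fun a ha => by
        have := List.of_mem_filter ha; simp only [beq_iff_eq] at this
        simp only [pvBefore, this, decide_eq_false_iff_not]; omega)]
      have hstep : PySem.List.insertBy (fun a b => decide (b < a)) x.2 (L :: Ls) =
          L :: PySem.List.insertBy (fun a b => decide (b < a)) x.2 Ls := by
        simp [PySem.List.insertBy]; omega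
      rw [hstep, ih (List.Pairwise.of_cons hp) (fun h => hmem (by simp [h])) ]
      simp only [List.flatMap_cons]
      rw [pv_bucket_append (L := L), if_neg hxL]
      simp

-- the distinct-values list, sorted descending, is strictly descending
theorem pv_sorted_set_pairwise_gt (l : List Int) :
    (PySem.List.sorted (PySem.Set.ofList l) (fun x => x) true).Pairwise (· > ·) := by
  have h1 := PySem.List.sorted_pairwise_rev (PySem.Set.ofList l) (fun x : Int => x)
  have h2 : (PySem.List.sorted (PySem.Set.ofList l) (fun x : Int => x) true).Nodup :=
    (PySem.List.sorted_perm (PySem.Set.ofList l) (fun x : Int => x) true).symm.nodup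
      (PySem.Set.nodup_ofList l)
  exact (h1.and h2).imp (fun {a b} h => lt_of_le_of_ne h.1 (fun he => h.2 (he.symm)))

-- THE KEY LEMMA: the stable descending sort by snd is the bucket concatenation over
-- the distinct snd values taken in descending order.
theorem pv_sorted_eq_buckets {α : Type} (xs : List (α × Int)) :
    PySem.List.sorted xs (fun p => p.2) true =
      (PySem.List.sorted (PySem.Set.ofList (xs.map (·.2))) (fun x => x) true).flatMap
        (fun L => xs.filter (fun p => p.2 == L)) := by
  induction xs using List.reverseRecOn with
  | nil => rfl
  | append_singleton xs x ih =>
    have hsortstep : PySem.List.sorted (xs ++ [x]) (fun p => p.2) true =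
        PySem.List.insertBy pvBefore x (PySem.List.sorted xs (fun p => p.2) true) := by
      rw [PySem.List.sorted_rev_eq_foldl_insertBy, PySem.List.sorted_rev_eq_foldl_insertBy,
        List.foldl_append]
      rfl
    have hsetstep : PySem.Set.ofList ((xs ++ [x]).map (·.2)) =
        PySem.Set.add (PySem.Set.ofList (xs.map (·.2))) x.2 := by
      simp [PySem.Set.ofList, List.foldl_append]
    rw [hsortstep, ih]
    by_cases hmem : x.2 ∈ PySem.Set.ofList (xs.map (·.2))
    · have hLs : x.2 ∈ PySem.List.sorted (PySem.Set.ofList (xs.map (·.2))) (fun x => x) true :=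
        (PySem.List.mem_sorted _ _ _ _).mpr hmem
      rw [pv_insert_old _ (pv_sorted_set_pairwise_gt _) xs x hLs, hsetstep]
      have : PySem.Set.add (PySem.Set.ofList (xs.map (·.2))) x.2 =
          PySem.Set.ofList (xs.map (·.2)) := by
        simp only [PySem.Set.add]
        rw [if_pos]
        exact List.contains_iff_mem.mpr hmem
      rw [this]
    · have hLs : x.2 ∉ PySem.List.sorted (PySem.Set.ofList (xs.map (·.2))) (fun x => x) true :=
        fun h => hmem ((PySem.List.mem_sorted _ _ _ _).mp h)
      have hfil : xs.filter (fun p => p.2 == x.2) = [] := by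
        rw [List.filter_eq_nil_iff]
        intro p hp hbe
        apply hmem
        rw [PySem.Set.mem_ofList]
        simp only [beq_iff_eq] at hbe
        exact hbe ▸ List.mem_map_of_mem hp
      rw [pv_insert_new _ (pv_sorted_set_pairwise_gt _) xs x hLs hfil, hsetstep]
      have hadd : PySem.Set.add (PySem.Set.ofList (xs.map (·.2))) x.2 =
          PySem.Set.ofList (xs.map (·.2)) ++ [x.2] := by
        simp only [PySem.Set.add]
        rw [if_neg]
        intro h
        exact hmem (List.contains_iff_mem.mp h)
      rw [hadd]
      have : PySem.List.sorted (PySem.Set.ofList (xs.map (·.2)) ++ [x.2]) (fun x => x) true =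
          PySem.List.insertBy (fun a b => decide (b < a)) x.2
            (PySem.List.sorted (PySem.Set.ofList (xs.map (·.2))) (fun x => x) true) := by
        rw [PySem.List.sorted_rev_eq_foldl_insertBy, PySem.List.sorted_rev_eq_foldl_insertBy,
          List.foldl_append]
        rfl
      rw [this]

-- ===== VERDICT (by name: the statement is the Claim_ definition above) =====
theorem calSubStrLen_spec : Claim_equal_calSubStrLen := by
  intro dic _
  show calSubStrLen dic = calSubStrLen_alt dic
  unfold calSubStrLen calSubStrLen_alt
  set ks := (PySem.Dict.ofList dic).keys with hks
  have hnd : ks.Nodup := PySem.Dict.nodup_keys_ofList dic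
  -- A's dict items are the (key, len) pairs in key order
  have hitems :
      (ks.foldl (fun d k => d.insert k (PySem.Str.len k)) PySem.Dict.empty).items =
        ks.map (fun k => (k, (PySem.Str.len k : Int))) := by
    have := PySem.Dict.items_foldl_insert_fresh ks (fun k => k)
      (fun k => (PySem.Str.len k : Int)) PySem.Dict.empty
      (fun a _ => PySem.Dict.contains_empty a) (by simpa using hnd)
    simpa using this
  -- B's bucket dict: keys and lookups
  have hfold :
      ks.foldl (fun d k => d.modify (PySem.Str.len k) [] (fun v => v ++ [k])) PySem.Dict.empty =
        (ks.map (fun k => ((PySem.Str.len k : Int), k))).foldl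
          (fun d p => d.modify p.1 [] (fun v => v ++ [p.2])) PySem.Dict.empty := by
    rw [List.foldl_map]
  have hbkeys :
      (ks.foldl (fun d k => d.modify (PySem.Str.len k) [] (fun v => v ++ [k]))
          PySem.Dict.empty).keys = PySem.Set.ofList (ks.map (fun k => (PySem.Str.len k : Int))) := by
    have := PySem.Dict.keys_foldl_modify_key ks (fun k => (PySem.Str.len k : Int))
      ([] : List String) (fun _ k v => v ++ [k]) PySem.Dict.empty
    simpa [PySem.Set.update, PySem.Set.ofList, PySem.Dict.keys_empty, PySem.Set.empty] using this
  have hgetD : ∀ L : Int,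
      (ks.foldl (fun d k => d.modify (PySem.Str.len k) [] (fun v => v ++ [k]))
          PySem.Dict.empty).getD L [] = ks.filter (fun k => (PySem.Str.len k : Int) == L) := by
    intro L
    rw [hfold]
    rw [PySem.Dict.getD_foldl_modify_append]
    rw [List.filter_map]
    simp [List.map_map, Function.comp_def]
  simp only [hitems, hbkeys]
  rw [pv_sorted_eq_buckets (ks.map (fun k => (k, (PySem.Str.len k : Int))))]
  rw [PySem.List.foldl_append_eq_flatMap]
  simp only [List.nil_append, List.map_map]
  have hcomp : ((fun x => x.2) ∘ fun k => (k, (PySem.Str.len k : Int))) =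
      fun k => (PySem.Str.len k : Int) := rfl
  rw [hcomp]
  rw [List.flatMap_def, List.flatMap_def]
  apply congrArg List.flatten
  apply List.map_congr_left
  intro L _
  rw [hgetD L]
  rw [List.filter_map]
  apply List.map_congr_left
  intro k hk
  have hlenk : PySem.Str.len k = L := by
    have := List.mem_filter.mp hk
    simpa using this.2
  show (k, PySem.Str.len k) = (k, L)
  rw [hlenk]
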